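-- pv_equiv track=rewrite | github.com/wkwako/jump-king-rl | PlatformParser.py | detect_wide_ceiling
-- ===== SOURCE A (Python) =====
-- def detect_wide_ceiling(tiles, min_ceiling_width=100):
--     # only look at tiles above player
--     above_tiles = [t for t in tiles if t[1] < 0]
--
--     if not above_tiles:
--         return 9999
--
--     tile_w = 8
--     tile_spacing = 8
--
--     # group by y
--     by_y = {}
--     for x, y, w, h in above_tiles:
--         by_y.setdefault(round(y), []).append(x)
--
--     # find the lowest (closest to player) wide segment
--     wide_ceiling_dist = 9999
--     for y in sorted(by_y.keys(), reverse=True):  # closest y first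
--         xs = sorted(by_y[y])
--         # merge horizontally
--         start = xs[0]; end = xs[0]
--         for x in xs[1:]:
--             if x - end - tile_w <= tile_spacing:
--                 end = x
--             else:
--                 width = (end + tile_w) - start
--                 if width >= min_ceiling_width:
--                     wide_ceiling_dist = -y  # convert to positive distance
--                     return wide_ceiling_dist
--                 start = x; end = x
--         width = (end + tile_w) - start
--         if width >= min_ceiling_width:
--             wide_ceiling_dist = -y
--             return wide_ceiling_dist
--
--     return wide_ceiling_dist
-- ===== SOURCE B (Python) =====
-- def detect_wide_ceiling(tiles, min_ceiling_width=100):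
--     # distinct rounded y-values above the player, scanned closest-first;
--     # per y, split the sorted xs at gaps > 16 and test each run's span directly
--     ys = {round(y) for (x, y, w, h) in tiles if y < 0}
--     if not ys:
--         return 9999
--     for ry in sorted(ys, reverse=True):
--         xs = sorted(x for (x, y, w, h) in tiles if round(y) == ry)
--         start = xs[0]
--         for a, b in zip(xs, xs[1:]):
--             if b - a > 16:
--                 if a + 8 - start >= min_ceiling_width:
--                     return -ry
--                 start = b
--         if xs[-1] + 8 - start >= min_ceiling_width:
--             return -ry
--     return 9999
-- ===== Notes on version B (the rewrite author's own statement) =====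
-- stated objective: simpler
-- what changed: Replaces the dict-grouping plus start/end run-merging loop by a set of distinct y-values scanned closest-first, re-filtering and sorting each y-group's xs and splitting them at adjacent gaps > 16 via zip(xs, xs[1:]), testing each run's span last-first+8 directly.
import Mathlib
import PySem

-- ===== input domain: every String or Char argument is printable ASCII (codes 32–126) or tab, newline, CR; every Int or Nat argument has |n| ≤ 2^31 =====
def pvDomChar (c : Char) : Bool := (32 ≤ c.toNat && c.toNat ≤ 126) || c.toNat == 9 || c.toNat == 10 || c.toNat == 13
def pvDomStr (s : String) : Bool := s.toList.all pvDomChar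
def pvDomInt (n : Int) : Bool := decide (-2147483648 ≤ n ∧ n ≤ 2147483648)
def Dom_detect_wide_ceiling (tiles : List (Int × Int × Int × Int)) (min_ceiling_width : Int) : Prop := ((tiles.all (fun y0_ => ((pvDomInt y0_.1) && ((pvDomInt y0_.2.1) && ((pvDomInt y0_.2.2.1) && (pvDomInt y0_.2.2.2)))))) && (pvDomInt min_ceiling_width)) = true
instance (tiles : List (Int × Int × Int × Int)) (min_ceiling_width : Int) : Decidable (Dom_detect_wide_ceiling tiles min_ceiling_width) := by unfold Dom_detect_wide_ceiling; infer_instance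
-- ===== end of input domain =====

-- ===== PORT A =====
-- B replaces A's dict grouping + start/end run merging by a set of y-values with per-y
-- refiltering and a zip-adjacent gap-split scan; same return value, proved equal (objective: simpler).

-- A's inner merge loop over xs[1:], state (start, e); some r = early 'return r', none = loop fell through
def pvInnerA (minw y start e : Int) : List Int → Option Int
  | [] => if (e + 8) - start ≥ minw then some (-y) else none
  | x :: rest =>
    if x - e - 8 ≤ 8 then pvInnerA minw y start x rest
    else if (e + 8) - start ≥ minw then some (-y)
    else pvInnerA minw y x x rest

-- A's outer loop over the reverse-sorted keys; by_y[y] is ported as getD y [] (y is always a key)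
def pvOuterA (minw : Int) (d : PySem.Dict Int (List Int)) : List Int → Option Int
  | [] => none
  | y :: ys =>
    match PySem.List.sorted (d.getD y []) (fun x => x) false with
    | [] => pvOuterA minw d ys   -- unreachable: every key of by_y owns a nonempty group (Python's xs[0] would raise)
    | x0 :: rest =>
      match pvInnerA minw y x0 x0 rest with
      | some r => some r
      | none => pvOuterA minw d ys

def detect_wide_ceiling (tiles : List (Int × Int × Int × Int)) (min_ceiling_width : Int) : Int :=
  let above_tiles := tiles.filter (fun t => decide (t.2.1 < 0))
  if above_tiles = [] then 9999
  else
    -- by_y.setdefault(round(y), []).append(x) = modify y [] (· ++ [x]); round(y) = y on Int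
    let by_y := above_tiles.foldl (fun d t => d.modify t.2.1 [] (fun l => l ++ [t.1])) PySem.Dict.empty
    match pvOuterA min_ceiling_width by_y (PySem.List.sorted by_y.keys (fun y => y) true) with
    | some r => r
    | none => 9999

-- ===== PORT B =====
-- B's gap loop over zip(xs, xs[1:]), state start; .inl r = early 'return r', .inr s = fell through with start = s
def pvGapB (minw ry start : Int) : List (Int × Int) → Sum Int Int
  | [] => Sum.inr start
  | (a, b) :: rest =>
    if b - a > 16 then
      if a + 8 - start ≥ minw then Sum.inl (-ry)
      else pvGapB minw ry b rest
    else pvGapB minw ry start rest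

-- one y-group of B: start = xs[0], gap loop, then the final run xs[-1] + 8 - start
def pvGroupB (minw ry : Int) : List Int → Option Int
  | [] => none   -- unreachable: ry ∈ ys guarantees a nonempty group (Python's xs[0] would raise)
  | x0 :: tail =>
    match pvGapB minw ry x0 ((x0 :: tail).zip ((x0 :: tail).drop 1)) with
    | Sum.inl r => some r
    | Sum.inr start =>
      if PySem.List.pyGetD (x0 :: tail) (-1) 0 + 8 - start ≥ minw then some (-ry) else none

def pvOuterB (minw : Int) (tiles : List (Int × Int × Int × Int)) : List Int → Option Int
  | [] => none
  | ry :: rest =>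
    match pvGroupB minw ry
        (PySem.List.sorted ((tiles.filter (fun t => decide (t.2.1 = ry))).map (fun t => t.1)) (fun x => x) false) with
    | some r => some r
    | none => pvOuterB minw tiles rest

def detect_wide_ceiling_alt (tiles : List (Int × Int × Int × Int)) (min_ceiling_width : Int) : Int :=
  let ys : PySem.Set Int := PySem.Set.ofList ((tiles.filter (fun t => decide (t.2.1 < 0))).map (fun t => t.2.1))
  if ys = [] then 9999
  else
    match pvOuterB min_ceiling_width tiles (PySem.List.sorted ys (fun y => y) true) with
    | some r => r
    | none => 9999

-- ===== PRECONDITION & SPEC =====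
def Spec_detect_wide_ceiling (tiles : List (Int × Int × Int × Int)) (min_ceiling_width : Int) (out : Int) : Prop := out = detect_wide_ceiling_alt tiles min_ceiling_width
instance (tiles : List (Int × Int × Int × Int)) (min_ceiling_width : Int) (out : Int) : Decidable (Spec_detect_wide_ceiling tiles min_ceiling_width out) := by unfold Spec_detect_wide_ceiling; infer_instance

-- ===== CLAIM (what is proved, stated in full; the proofs are below) =====
def Claim_equal_detect_wide_ceiling : Prop := ∀ (tiles : List (Int × Int × Int × Int)) (min_ceiling_width : Int), Dom_detect_wide_ceiling tiles min_ceiling_width → Spec_detect_wide_ceiling tiles min_ceiling_width (detect_wide_ceiling tiles min_ceiling_width)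

-- ===== LEMMAS AND PROOFS =====

-- A's running 'end' is always the previous element of xs, so A's merge loop over xs[1:]
-- (tail, with start/e carried) computes exactly B's gap-split scan over adjacent pairs.
theorem pvInnerA_eq_gap (minw y : Int) : ∀ (tail : List Int) (start e : Int),
    pvInnerA minw y start e tail =
      (match pvGapB minw y start ((e :: tail).zip tail) with
       | Sum.inl r => some r
       | Sum.inr s =>
         if PySem.List.pyGetD (e :: tail) (-1) 0 + 8 - s ≥ minw then some (-y) else none) := by
  intro tail
  induction tail with
  | nil =>
    intro start e
    simp [pvInnerA, pvGapB, pysem]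
  | cons x rest ih =>
    intro start e
    have hlast : PySem.List.pyGetD (e :: x :: rest) (-1) 0 = PySem.List.pyGetD (x :: rest) (-1) 0 := by
      rw [PySem.List.pyGetD_neg_one (h := by simp), PySem.List.pyGetD_neg_one (h := by simp)]
      exact List.getLast_cons _
    by_cases h : x - e - 8 ≤ 8
    · have h' : ¬ (x - e > 16) := by omega
      simp only [pvInnerA, pvGapB, List.zip_cons_cons, if_pos h, if_neg h', hlast]
      exact ih start x
    · have h' : x - e > 16 := by omega
      simp only [pvInnerA, pvGapB, List.zip_cons_cons, if_neg h, if_pos h', hlast]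
      by_cases hw : (e + 8) - start ≥ minw
      · simp only [if_pos hw]
      · simp only [if_neg hw]
        exact ih x x

theorem pvInnerA_eq_groupB (minw y x0 : Int) (tail : List Int) :
    pvInnerA minw y x0 x0 tail = pvGroupB minw y (x0 :: tail) := by
  simpa [pvGroupB] using pvInnerA_eq_gap minw y tail x0 x0

-- the dict group of A at key y (y < 0) is the x's of the tiles whose y-coordinate equals y, in order
theorem groupA_eq (tiles : List (Int × Int × Int × Int)) (y : Int) (hy : y < 0) :
    ((tiles.filter (fun t => decide (t.2.1 < 0))).foldl
        (fun d t => d.modify t.2.1 [] (fun l => l ++ [t.1])) PySem.Dict.empty).getD y [] =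
      (tiles.filter (fun t => decide (t.2.1 = y))).map (fun t => t.1) := by
  have h1 : ((tiles.filter (fun t => decide (t.2.1 < 0))).foldl
        (fun d t => d.modify t.2.1 [] (fun l => l ++ [t.1])) PySem.Dict.empty) =
      (((tiles.filter (fun t => decide (t.2.1 < 0))).map (fun t => (t.2.1, t.1))).foldl
        (fun d p => d.modify p.1 [] (fun l => l ++ [p.2])) PySem.Dict.empty) := by
    rw [List.foldl_map]
  rw [h1, PySem.Dict.getD_foldl_modify_append, List.filter_map]
  have h2 : (List.filter (fun t : Int × Int × Int × Int => decide (t.2.1 = y)) tiles) =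
      List.filter ((fun p : Int × Int => p.1 == y) ∘ fun t : Int × Int × Int × Int => (t.2.1, t.1))
        (List.filter (fun t => decide (t.2.1 < 0)) tiles) := by
    rw [List.filter_filter]
    apply List.filter_congr
    intro t _
    by_cases ht : t.2.1 = y
    · simp [ht, hy]
    · simp [ht]
  rw [← h2]
  simp [Function.comp]

theorem keysA_eq (tiles : List (Int × Int × Int × Int)) :
    ((tiles.filter (fun t => decide (t.2.1 < 0))).foldl
        (fun d t => d.modify t.2.1 [] (fun l => l ++ [t.1])) PySem.Dict.empty).keys =
      PySem.Set.ofList ((tiles.filter (fun t => decide (t.2.1 < 0))).map (fun t => t.2.1)) := by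
  rw [PySem.Dict.keys_foldl_modify_key (tiles.filter (fun t => decide (t.2.1 < 0)))
        (fun t => t.2.1) [] (fun _ t => fun l => l ++ [t.1]) PySem.Dict.empty]
  simp [PySem.Set.update_nil_left]

theorem outer_eq (minw : Int) (tiles : List (Int × Int × Int × Int)) (d : PySem.Dict Int (List Int)) :
    ∀ (L : List Int),
      (∀ y ∈ L, d.getD y [] = (tiles.filter (fun t => decide (t.2.1 = y))).map (fun t => t.1)) →
      pvOuterA minw d L = pvOuterB minw tiles L := by
  intro L
  induction L with
  | nil => intro _; rfl
  | cons y ys ih =>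
    intro h
    have hy := h y (List.mem_cons_self ..)
    have hrest : ∀ z ∈ ys, d.getD z [] = (tiles.filter (fun t => decide (t.2.1 = z))).map (fun t => t.1) :=
      fun z hz => h z (List.mem_cons_of_mem _ hz)
    simp only [pvOuterA, pvOuterB, hy]
    cases hs : PySem.List.sorted ((tiles.filter
        (fun t => decide (t.2.1 = y))).map (fun t => t.1)) (fun x => x) false with
    | nil => simp [pvGroupB, ih hrest]
    | cons x0 tail =>
      simp only [pvInnerA_eq_groupB minw y x0 tail]
      cases pvGroupB minw y (x0 :: tail) with
      | none => simp [ih hrest]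
      | some r => simp

-- ===== VERDICT (by name: the statement is the Claim_ definition above) =====
theorem detect_wide_ceiling_spec : Claim_equal_detect_wide_ceiling := by
  intro tiles minw _
  unfold Spec_detect_wide_ceiling detect_wide_ceiling detect_wide_ceiling_alt
  by_cases ha : tiles.filter (fun t => decide (t.2.1 < 0)) = []
  · simp [ha]
  · obtain ⟨t, rest, hcons⟩ : ∃ t rest, tiles.filter (fun t => decide (t.2.1 < 0)) = t :: rest := by
      cases hx : tiles.filter (fun t => decide (t.2.1 < 0)) with
      | nil => exact absurd hx ha
      | cons a b => exact ⟨a, b, rfl⟩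
    have hset : PySem.Set.ofList ((tiles.filter (fun t => decide (t.2.1 < 0))).map (fun t => t.2.1)) ≠ [] := by
      rw [hcons]
      simp [PySem.Set.ofList_cons]
    simp only [if_neg ha, if_neg hset]
    have hout : pvOuterA minw
        ((tiles.filter (fun t => decide (t.2.1 < 0))).foldl
          (fun d t => d.modify t.2.1 [] (fun l => l ++ [t.1])) PySem.Dict.empty)
        (PySem.List.sorted
          (PySem.Set.ofList ((tiles.filter (fun t => decide (t.2.1 < 0))).map (fun t => t.2.1)))
          (fun y => y) true) =
        pvOuterB minw tiles
        (PySem.List.sorted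
          (PySem.Set.ofList ((tiles.filter (fun t => decide (t.2.1 < 0))).map (fun t => t.2.1)))
          (fun y => y) true) := by
      apply outer_eq
      intro y hmem
      have hy : y < 0 := by
        have h1 : y ∈ PySem.Set.ofList ((tiles.filter (fun t => decide (t.2.1 < 0))).map (fun t => t.2.1)) :=
          (PySem.List.mem_sorted ..).1 hmem
        have h2 : y ∈ (tiles.filter (fun t => decide (t.2.1 < 0))).map (fun t => t.2.1) :=
          (PySem.Set.mem_ofList ..).1 h1
        obtain ⟨u, hu, hy⟩ := List.mem_map.1 h2
        have := List.of_mem_filter hu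
        subst hy
        simpa using this
      exact groupA_eq tiles y hy
    rw [keysA_eq tiles, hout]
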